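-- pv_equiv track=rewrite | github.com/oescob16/CS2302-Data-Structures | Exercises/Intro To Python/intro_to_python.py | replace_max_array
-- ===== SOURCE A (Python) =====
-- def replace_max_array(A,x):
--     B = A.copy()
--     max = B[0][0]
--     row = 0
--     col = 0
--     for i in range(len(B)):
--         for j in range(len(B[i])):
--             if B[i][j] > max:
--                 max = B[i][j]
--                 row = i   # We store the row location of the current max.
--                 col = j   # We store the column location of the current max.
--     B[row][col] = x   # We replace the max value with the value of x.
--     return B
-- ===== SOURCE B (Python) =====
-- # Two-pass version: compute the global max of the flattened matrix, then
-- # replace its first row-major occurrence.  Like A it keeps a shallow copy,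
-- # so the inner-list mutation is shared with the caller's rows.
-- def replace_max_array(A, x):
--     B = A.copy()
--     m = max(v for row in B for v in row)
--     for row in B:
--         if m in row:
--             row[row.index(m)] = x
--             break
--     return B
-- ===== Notes on version B (the rewrite author's own statement) =====
-- stated objective: alternative
-- what changed: replaces the single location-tracking argmax scan with two passes: a value pass computing the global maximum, then a row-major search that replaces its first occurrence
import Mathlib
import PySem

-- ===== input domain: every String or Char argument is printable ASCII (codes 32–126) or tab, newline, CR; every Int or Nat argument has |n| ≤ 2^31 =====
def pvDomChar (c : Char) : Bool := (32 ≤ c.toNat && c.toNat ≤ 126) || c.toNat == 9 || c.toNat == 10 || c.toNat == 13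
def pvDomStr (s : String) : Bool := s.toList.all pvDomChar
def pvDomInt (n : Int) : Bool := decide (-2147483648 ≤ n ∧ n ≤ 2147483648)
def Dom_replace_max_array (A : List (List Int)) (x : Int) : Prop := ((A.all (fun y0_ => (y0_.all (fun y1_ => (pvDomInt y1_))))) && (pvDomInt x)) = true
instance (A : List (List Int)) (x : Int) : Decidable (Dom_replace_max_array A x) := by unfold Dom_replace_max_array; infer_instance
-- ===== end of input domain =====

-- B replaces the single location-tracking argmax scan by two passes (global max, then
-- first row-major occurrence).  Equivalence is about the RETURN value; both Pythons
-- mutate the shared inner row of the shallow copy in the same way.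

-- ===== PORT A =====
-- Literal port: B = A.copy(); seed max = B[0][0]; nested index loops tracking (max,row,col);
-- then B[row][col] = x.  row/col are produced non-negative and, under Pre_, in range,
-- so the final item assignment is List.set at their toNat.
def replace_max_array (A : List (List Int)) (x : Int) : List (List Int) :=
  let B := A
  let s : Int × Int × Int :=
    (PySem.List.pyRange 0 (B.length : Int) 1).foldl (fun s i =>
      (PySem.List.pyRange 0 ((PySem.List.pyGetD B i []).length : Int) 1).foldl (fun s j =>
        if PySem.List.pyGetD (PySem.List.pyGetD B i []) j 0 > s.1 then
          (PySem.List.pyGetD (PySem.List.pyGetD B i []) j 0, i, j)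
        else s) s)
      (PySem.List.pyGetD (PySem.List.pyGetD B 0 []) 0 0, 0, 0)
  B.set s.2.1.toNat ((B.getD s.2.1.toNat []).set s.2.2.toNat x)

-- ===== PORT B =====
-- helper: 'if m in row: row[row.index(m)] = x; break' of the for-loop in Source B
def pvGo (m x : Int) : List (List Int) → List (List Int)
  | [] => []
  | r :: rs =>
    match PySem.List.index? r m with
    | some k => r.set k x :: rs
    | none => r :: pvGo m x rs

def replace_max_array_alt (A : List (List Int)) (x : Int) : List (List Int) :=
  let flat := A.flatMap id
  -- max(generator); the headD seed is only used when flat = [], which Pre_ excludes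
  let m := flat.foldl max (flat.headD 0)
  pvGo m x A

-- ===== PRECONDITION & SPEC =====
-- Pre_ excludes exactly the inputs on which A raises IndexError: A = [] or A[0] = [].
def Pre_replace_max_array (A : List (List Int)) (x : Int) : Prop :=
  A ≠ [] ∧ A.headD [] ≠ []
instance (A : List (List Int)) (x : Int) : Decidable (Pre_replace_max_array A x) := by
  unfold Pre_replace_max_array; infer_instance
def pvWitness_replace_max_array : List (List Int) × Int := ([[1, 2], [3]], 7)

def Spec_replace_max_array (A : List (List Int)) (x : Int) (out : List (List Int)) : Prop := out = replace_max_array_alt A x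
instance (A : List (List Int)) (x : Int) (out : List (List Int)) : Decidable (Spec_replace_max_array A x out) := by unfold Spec_replace_max_array; infer_instance

-- ===== CLAIM (what is proved, stated in full; the proofs are below) =====
def Claim_equal_replace_max_array : Prop := ∀ (A : List (List Int)) (x : Int), Dom_replace_max_array A x → Pre_replace_max_array A x → Spec_replace_max_array A x (replace_max_array A x)
-- ===== LEMMAS AND PROOFS =====

theorem init_le_foldl_max (r : List Int) (m : Int) : m ≤ r.foldl max m := by
  induction r generalizing m with
  | nil => simp
  | cons v vs ih => exact le_trans (le_max_left m v) (ih (max m v))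

theorem foldl_max_mem (r : List Int) (m : Int) (h : r.foldl max m > m) :
    r.foldl max m ∈ r := by
  induction r generalizing m with
  | nil => simp at h
  | cons v vs ih =>
    simp only [List.foldl_cons] at h ⊢
    by_cases hgt : vs.foldl max (max m v) > max m v
    · exact List.mem_cons_of_mem _ (ih (max m v) hgt)
    · have h1 := init_le_foldl_max vs (max m v)
      have : vs.foldl max (max m v) = max m v := le_antisymm (not_lt.mp hgt) h1
      rw [this] at h ⊢
      have : max m v = v := by omega
      rw [this]; exact List.mem_cons_self
  termination_by r.length

theorem mem_le_foldl_max (r : List Int) (m a : Int) (ha : a ∈ r) : a ≤ r.foldl max m := by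
  induction r generalizing m with
  | nil => simp at ha
  | cons v vs ih =>
    simp only [List.foldl_cons]
    rcases List.mem_cons.mp ha with h | h
    · subst h; exact le_trans (le_max_right m a) (init_le_foldl_max vs _)
    · exact ih (max m v) h

-- the inner j-loop of A over one row, as a fold over the row's enumeration
theorem rowScan (i : Int) (r : List Int) : ∀ (j m : Int) (p : Int × Int),
    (PySem.List.enumerate r j).foldl
      (fun (s : Int × Int × Int) q => if q.2 > s.1 then (q.2, i, q.1) else s) (m, p)
    = if r.foldl max m > m then
        (r.foldl max m, i, j + (r.findIdx (fun v => v == r.foldl max m) : Int))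
      else (m, p) := by
  induction r with
  | nil => intro j m p; simp [PySem.List.enumerate_nil]
  | cons v vs ih =>
    intro j m p
    rw [PySem.List.enumerate_cons]
    simp only [List.foldl_cons, List.findIdx_cons]
    by_cases hv : v > m
    · simp only [if_pos hv]
      rw [ih (j + 1) v (i, j)]
      have hmv : max m v = v := by omega
      by_cases hM : vs.foldl max v > v
      · have hMm : vs.foldl max v > m := by omega
        have hne : ¬ (v == vs.foldl max v) = true := by simp; omega
        simp only [List.foldl_cons, hmv, if_pos hM, if_pos hMm, hne, cond_false]
        push_cast; ring_nf
      · have hle := init_le_foldl_max vs v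
        have hEq : vs.foldl max v = v := by omega
        simp [hmv, hEq, hv]
    · simp only [if_neg hv]
      rw [ih (j + 1) m p]
      have hmv : max m v = m := by omega
      by_cases hM : vs.foldl max m > m
      · have hne : ¬ (v == vs.foldl max m) = true := by simp; omega
        simp only [List.foldl_cons, hmv, if_pos hM, hne, cond_false]
        push_cast; ring_nf
      · simp only [List.foldl_cons, hmv, if_neg hM]

-- the outer i-loop of A, as a fold over the enumeration of the rows
theorem rowsScan (rows : List (List Int)) : ∀ (i m : Int) (p : Int × Int),
    (PySem.List.enumerate rows i).foldl
      (fun (s : Int × Int × Int) pr =>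
        (PySem.List.enumerate pr.2 0).foldl
          (fun (s : Int × Int × Int) q => if q.2 > s.1 then (q.2, pr.1, q.1) else s) s)
      (m, p)
    = (let M := rows.flatten.foldl max m
       if M > m then
         (M, i + (rows.findIdx (fun r => r.contains M) : Int),
          ((rows.getD (rows.findIdx (fun r => r.contains M)) []).findIdx (fun v => v == M) : Int))
       else (m, p)) := by
  induction rows with
  | nil => intro i m p; simp [PySem.List.enumerate_nil]
  | cons r rs ih =>
    intro i m p
    rw [PySem.List.enumerate_cons]
    simp only [List.foldl_cons]
    rw [rowScan i r 0 m p]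
    have hflat : ((r :: rs).flatten).foldl max m
        = rs.flatten.foldl max (r.foldl max m) := by
      simp [List.flatten_cons, List.foldl_append]
    by_cases hr : r.foldl max m > m
    · simp only [if_pos hr]
      rw [ih (i + 1) (r.foldl max m) _]
      simp only [hflat]
      by_cases hM : rs.flatten.foldl max (r.foldl max m) > r.foldl max m
      · have hMm : rs.flatten.foldl max (r.foldl max m) > m := by omega
        have hnc : (r.contains (rs.flatten.foldl max (r.foldl max m))) = false := by
          rw [List.contains_eq_any_beq]
          simp only [List.any_eq_false]
          intro a ha
          have := mem_le_foldl_max r m a ha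
          simp; omega
        simp only [if_pos hM, if_pos hMm, List.findIdx_cons, hnc, cond_false,
          List.getD_cons_succ, Prod.ext_iff, true_and, and_true]
        push_cast; ring
      · have hle := init_le_foldl_max rs.flatten (r.foldl max m)
        have hEq : rs.flatten.foldl max (r.foldl max m) = r.foldl max m := by omega
        have hc : (r.contains (r.foldl max m)) = true := by
          rw [List.contains_eq_any_beq]
          simp only [List.any_eq_true]
          exact ⟨_, foldl_max_mem r m hr, by simp⟩
        simp only [if_neg hM, hEq, if_pos hr, List.findIdx_cons, hc, cond_true,
          Nat.cast_zero, add_zero, List.getD_cons_zero, zero_add]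
        simp
    · have hle := init_le_foldl_max r m
      have hEq : r.foldl max m = m := by omega
      simp only [if_neg hr]
      rw [ih (i + 1) m p]
      simp only [hflat, hEq]
      by_cases hM : rs.flatten.foldl max m > m
      · have hnc : (r.contains (rs.flatten.foldl max m)) = false := by
          rw [List.contains_eq_any_beq]
          simp only [List.any_eq_false]
          intro a ha
          have := mem_le_foldl_max r m a ha
          rw [hEq] at this; simp; omega
        simp only [if_pos hM, List.findIdx_cons, hnc, cond_false, List.getD_cons_succ,
          Prod.ext_iff, true_and, and_true]
        push_cast; ring
      · simp only [if_neg hM]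

-- PySem.List.index? at a present element is findIdx of the equality test
theorem index?_findIdx (r : List Int) (m : Int) (h : m ∈ r) :
    PySem.List.index? r m = some (r.findIdx (fun v => v == m)) := by
  induction r with
  | nil => simp at h
  | cons v vs ih =>
    by_cases hv : v = m
    · subst hv
      rw [PySem.List.index?_cons_self]
      simp [List.findIdx_cons]
    · have hm : m ∈ vs := by
        rcases List.mem_cons.mp h with h1 | h1
        · exact absurd h1.symm hv
        · exact h1
      rw [PySem.List.index?_cons_of_ne vs hv, ih hm]
      have hb : (v == m) = false := by simp [hv]
      simp [List.findIdx_cons, hb]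

-- pvGo replaces the first row-major occurrence of m
theorem pvGo_eq (m x : Int) (rows : List (List Int)) (h : ∃ r ∈ rows, m ∈ r) :
    pvGo m x rows
    = rows.set (rows.findIdx (fun r => r.contains m))
        ((rows.getD (rows.findIdx (fun r => r.contains m)) []).set
          ((rows.getD (rows.findIdx (fun r => r.contains m)) []).findIdx (fun v => v == m)) x) := by
  induction rows with
  | nil => simp at h
  | cons r rs ih =>
    by_cases hm : m ∈ r
    · have hc : (r.contains m) = true := by
        rw [List.contains_eq_any_beq]
        exact List.any_eq_true.mpr ⟨m, hm, by simp⟩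
      show (match PySem.List.index? r m with
            | some k => r.set k x :: rs
            | none => r :: pvGo m x rs) = _
      rw [index?_findIdx r m hm]
      simp only [List.findIdx_cons, hc, cond_true, List.set_cons_zero, List.getD_cons_zero]
    · have hc : (r.contains m) = false := by
        rw [List.contains_eq_any_beq]
        refine List.any_eq_false.mpr ?_
        intro a ha hb
        exact hm ((eq_of_beq hb) ▸ ha)
      have hidx : PySem.List.index? r m = none := by
        rw [PySem.List.index?_eq_none_iff]; exact hm
      have h' : ∃ r' ∈ rs, m ∈ r' := by
        rcases h with ⟨r', hr', hmr'⟩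
        rcases List.mem_cons.mp hr' with h1 | h1
        · exact absurd (h1 ▸ hmr') hm
        · exact ⟨r', h1, hmr'⟩
      show (match PySem.List.index? r m with
            | some k => r.set k x :: rs
            | none => r :: pvGo m x rs) = _
      rw [hidx]
      simp only [List.findIdx_cons, hc, cond_false, List.set_cons_succ, List.getD_cons_succ]
      rw [ih h']

-- index loops over pyRange/pyGetD rewritten as folds over enumerations
theorem innerConv (r : List Int) (i : Int) (s : Int × Int × Int) :
    (PySem.List.pyRange 0 (r.length : Int) 1).foldl
      (fun s j => if PySem.List.pyGetD r j 0 > s.1 then (PySem.List.pyGetD r j 0, i, j) else s) s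
    = (PySem.List.enumerate r 0).foldl
        (fun s q => if q.2 > s.1 then (q.2, i, q.1) else s) s := by
  rw [PySem.List.enumerate_eq_map_pyRange r 0, List.foldl_map, PySem.List.len_eq]

theorem outerConv (A : List (List Int)) (init : Int × Int × Int) :
    (PySem.List.pyRange 0 (A.length : Int) 1).foldl (fun s i =>
      (PySem.List.pyRange 0 ((PySem.List.pyGetD A i []).length : Int) 1).foldl (fun s j =>
        if PySem.List.pyGetD (PySem.List.pyGetD A i []) j 0 > s.1 then
          (PySem.List.pyGetD (PySem.List.pyGetD A i []) j 0, i, j)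
        else s) s) init
    = (PySem.List.enumerate A 0).foldl
        (fun (s : Int × Int × Int) pr =>
          (PySem.List.enumerate pr.2 0).foldl
            (fun (s : Int × Int × Int) q => if q.2 > s.1 then (q.2, pr.1, q.1) else s) s) init := by
  rw [PySem.List.enumerate_eq_map_pyRange A [], List.foldl_map, PySem.List.len_eq]
  have hf : (fun (s : Int × Int × Int) (j : Int) =>
      (PySem.List.pyRange 0 ((PySem.List.pyGetD A j []).length : Int) 1).foldl (fun s k =>
        if PySem.List.pyGetD (PySem.List.pyGetD A j []) k 0 > s.1 then
          (PySem.List.pyGetD (PySem.List.pyGetD A j []) k 0, j, k)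
        else s) s)
      = (fun (s : Int × Int × Int) (j : Int) =>
      (PySem.List.enumerate (PySem.List.pyGetD A j []) 0).foldl
        (fun s q => if q.2 > s.1 then (q.2, j, q.1) else s) s) := by
    funext s j
    exact innerConv (PySem.List.pyGetD A j []) j s
  rw [hf]

-- ===== VERDICT (by name: the statement is the Claim_ definition above) =====
theorem replace_max_array_spec : Claim_equal_replace_max_array := by
  intro A x _ hpre
  obtain ⟨hne, hhd⟩ := hpre
  obtain ⟨r0, rest, rfl⟩ : ∃ r0 rest, A = r0 :: rest := by
    cases A with
    | nil => exact absurd rfl hne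
    | cons a l => exact ⟨a, l, rfl⟩
  obtain ⟨v0, t0, rfl⟩ : ∃ v0 t0, r0 = v0 :: t0 := by
    cases r0 with
    | nil => simp at hhd
    | cons a l => exact ⟨a, l, rfl⟩
  show Spec_replace_max_array _ _ _
  simp only [Spec_replace_max_array, replace_max_array, replace_max_array_alt]
  rw [outerConv, rowsScan]
  have hseed : PySem.List.pyGetD (PySem.List.pyGetD ((v0 :: t0) :: rest) 0 []) 0 0 = v0 := by
    simp [PySem.List.pyGetD, PySem.List.pyGet?, PySem.List.pyIdx?]
  rw [hseed]
  have hflatid : List.flatMap id ((v0 :: t0) :: rest) = ((v0 :: t0) :: rest).flatten := by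
    simp
  rw [hflatid]
  have hflat : ((v0 :: t0) :: rest).flatten = v0 :: (t0 ++ rest.flatten) := by simp
  have hhead : (((v0 :: t0) :: rest).flatten).headD 0 = v0 := by rw [hflat]; rfl
  rw [hhead]
  set M := (((v0 :: t0) :: rest).flatten).foldl max v0 with hM_def
  by_cases hM : M > v0
  · -- the maximum beats the seed: both sides replace its first row-major occurrence
    simp only [if_pos hM]
    have hmem : M ∈ ((v0 :: t0) :: rest).flatten := foldl_max_mem _ v0 hM
    have hex : ∃ r ∈ (v0 :: t0) :: rest, M ∈ r := List.mem_flatten.mp hmem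
    rw [pvGo_eq M x _ hex]
    simp [Int.toNat_natCast]
  · -- the seed v0 = A[0][0] is the maximum: both sides replace position (0,0)
    have hle := init_le_foldl_max (((v0 :: t0) :: rest).flatten) v0
    have hEq : M = v0 := by omega
    simp only [if_neg hM]
    have hidx : PySem.List.index? (v0 :: t0) M = some 0 := by
      rw [hEq]; exact PySem.List.index?_cons_self v0 t0
    show _ = pvGo M x ((v0 :: t0) :: rest)
    simp only [pvGo]
    rw [hidx]
    simp
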